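-- pv_equiv track=rewrite | github.com/srpoyrek/sliding-squares | find_hardest_workspace.py | all_touching_placements
-- ===== SOURCE A (Python) =====
-- def all_touching_placements(rows, cols, n):
--     """All non-overlapping A/B placements where the two n*n blocks touch —
--     full edge, partial edge, or just a corner. Includes everything
--     `all_adjacent_placements` yields plus partial-offset and corner pairs.
--
--     Non-overlapping + touching condition: (|dr|==n AND |dc|<=n) OR
--     (|dr|<=n AND |dc|==n), where (dr, dc) = pos_b - pos_a.
--     """
--     offsets = []
--     for dr in range(-n, n + 1):
--         for dc in range(-n, n + 1):
--             if dr == 0 and dc == 0: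
--                 continue
--             if abs(dr) == n or abs(dc) == n:
--                 offsets.append((dr, dc))
--
--     for r_a in range(rows - n + 1):
--         for c_a in range(cols - n + 1):
--             for dr, dc in offsets:
--                 r_b = r_a + dr
--                 c_b = c_a + dc
--                 if 0 <= r_b <= rows - n and 0 <= c_b <= cols - n:
--                     yield ((r_a, c_a), (r_b, c_b))
--     return
-- ===== SOURCE B (Python) =====
-- def all_touching_placements(rows, cols, n):
--     """Same pairs in the same order as A, but without the precomputed offsets
--     table: for each anchor, scan partner rows directly over the clamped band
--     [r_a-n, r_a+n]; a full-edge row (|dr| == n) admits the whole clamped column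
--     band, any other row admits only the two corner columns c_a +/- n."""
--     hi_r = rows - n
--     hi_c = cols - n
--     for r_a in range(hi_r + 1):
--         for c_a in range(hi_c + 1):
--             for r_b in range(max(0, r_a - n), min(hi_r, r_a + n) + 1):
--                 if abs(r_b - r_a) == n:
--                     cs = range(max(0, c_a - n), min(hi_c, c_a + n) + 1)
--                 else:
--                     cs = [c for c in (c_a - n, c_a + n) if 0 <= c <= hi_c]
--                 for c_b in cs:
--                     if r_b == r_a and c_b == c_a:
--                         continue
--                     yield ((r_a, c_a), (r_b, c_b))
-- ===== Notes on version B (the rewrite author's own statement) =====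
-- stated objective: alternative
-- what changed: Drops A's precomputed (dr,dc) offsets table: for each anchor B scans partner rows directly over the clamped band [r_a-n, r_a+n], taking the full clamped column band when |dr|==n and only the two corner columns c_a+/-n otherwise, yielding pairs in the same lexicographic order.
import Mathlib
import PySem

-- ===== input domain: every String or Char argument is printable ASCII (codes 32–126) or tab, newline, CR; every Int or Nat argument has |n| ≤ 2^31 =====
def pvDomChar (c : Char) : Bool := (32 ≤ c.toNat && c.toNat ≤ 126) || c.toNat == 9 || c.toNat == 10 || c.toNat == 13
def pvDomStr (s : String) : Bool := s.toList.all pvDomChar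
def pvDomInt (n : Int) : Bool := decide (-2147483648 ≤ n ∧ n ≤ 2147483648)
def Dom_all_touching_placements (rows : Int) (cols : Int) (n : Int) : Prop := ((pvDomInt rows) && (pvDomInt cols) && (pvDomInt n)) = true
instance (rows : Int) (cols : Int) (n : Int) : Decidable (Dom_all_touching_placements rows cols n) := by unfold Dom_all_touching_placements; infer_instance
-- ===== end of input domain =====

-- B drops A's precomputed offsets table and scans partner positions directly in a
-- clamped band around each anchor, in the same order (objective: alternative).

-- ===== PORT A =====
def all_touching_placements (rows : Int) (cols : Int) (n : Int) : List ((Int × Int) × (Int × Int)) :=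
  let offsets : List (Int × Int) :=
    (PySem.List.pyRange (-n) (n + 1) 1).foldl (fun acc dr =>
      (PySem.List.pyRange (-n) (n + 1) 1).foldl (fun acc dc =>
        if dr = 0 ∧ dc = 0 then acc
        else if |dr| = n ∨ |dc| = n then acc ++ [(dr, dc)]
        else acc) acc) []
  (PySem.List.pyRange 0 (rows - n + 1) 1).foldl (fun acc r_a =>
    (PySem.List.pyRange 0 (cols - n + 1) 1).foldl (fun acc c_a =>
      offsets.foldl (fun acc p =>
        let r_b := r_a + p.1
        let c_b := c_a + p.2
        if 0 ≤ r_b ∧ r_b ≤ rows - n ∧ 0 ≤ c_b ∧ c_b ≤ cols - n then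
          acc ++ [((r_a, c_a), (r_b, c_b))]
        else acc) acc) acc) []

-- ===== PORT B =====
def all_touching_placements_alt (rows : Int) (cols : Int) (n : Int) : List ((Int × Int) × (Int × Int)) :=
  let hi_r := rows - n
  let hi_c := cols - n
  (PySem.List.pyRange 0 (hi_r + 1) 1).foldl (fun acc r_a =>
    (PySem.List.pyRange 0 (hi_c + 1) 1).foldl (fun acc c_a =>
      (PySem.List.pyRange (max 0 (r_a - n)) (min hi_r (r_a + n) + 1) 1).foldl (fun acc r_b =>
        let cs : List Int :=
          if |r_b - r_a| = n then
            PySem.List.pyRange (max 0 (c_a - n)) (min hi_c (c_a + n) + 1) 1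
          else
            [c_a - n, c_a + n].filter (fun c => decide (0 ≤ c ∧ c ≤ hi_c))
        cs.foldl (fun acc c_b =>
          if r_b = r_a ∧ c_b = c_a then acc
          else acc ++ [((r_a, c_a), (r_b, c_b))]) acc) acc) acc) []

-- ===== PRECONDITION & SPEC =====
def Spec_all_touching_placements (rows : Int) (cols : Int) (n : Int) (out : List ((Int × Int) × (Int × Int))) : Prop := out = all_touching_placements_alt rows cols n
instance (rows : Int) (cols : Int) (n : Int) (out : List ((Int × Int) × (Int × Int))) : Decidable (Spec_all_touching_placements rows cols n out) := by unfold Spec_all_touching_placements; infer_instance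

-- ===== CLAIM (what is proved, stated in full; the proofs are below) =====
def Claim_equal_all_touching_placements : Prop := ∀ (rows : Int) (cols : Int) (n : Int), Dom_all_touching_placements rows cols n → Spec_all_touching_placements rows cols n (all_touching_placements rows cols n)

-- ===== LEMMAS AND PROOFS =====

-- proof-only abbreviations: flatMap normal forms of the two loop nests
def pvOffsets (n : Int) : List (Int × Int) :=
  (PySem.List.pyRange (-n) (n + 1) 1).flatMap (fun dr =>
    (PySem.List.pyRange (-n) (n + 1) 1).flatMap (fun dc =>
      if dr = 0 ∧ dc = 0 then [] else if |dr| = n ∨ |dc| = n then [(dr, dc)] else []))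

def pvSel (rows cols n r_a c_a : Int) (p : Int × Int) : List ((Int × Int) × (Int × Int)) :=
  if 0 ≤ r_a + p.1 ∧ r_a + p.1 ≤ rows - n ∧ 0 ≤ c_a + p.2 ∧ c_a + p.2 ≤ cols - n then
    [((r_a, c_a), (r_a + p.1, c_a + p.2))]
  else []

def pvScan (rows cols n r_a c_a : Int) : List ((Int × Int) × (Int × Int)) :=
  (PySem.List.pyRange (max 0 (r_a - n)) (min (rows - n) (r_a + n) + 1) 1).flatMap (fun r_b =>
    (if |r_b - r_a| = n then
        PySem.List.pyRange (max 0 (c_a - n)) (min (cols - n) (c_a + n) + 1) 1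
      else
        [c_a - n, c_a + n].filter (fun c => decide (0 ≤ c ∧ c ≤ cols - n))).flatMap (fun c_b =>
      if r_b = r_a ∧ c_b = c_a then [] else [((r_a, c_a), (r_b, c_b))]))

-- two strictly increasing Int lists with the same members are equal
theorem pvSortedExt (l₁ l₂ : List Int) (h₁ : l₁.Pairwise (· < ·)) (h₂ : l₂.Pairwise (· < ·))
    (hm : ∀ x, x ∈ l₁ ↔ x ∈ l₂) : l₁ = l₂ := by
  have n₁ : l₁.Nodup := h₁.imp (fun h => ne_of_lt h)
  have n₂ : l₂.Nodup := h₂.imp (fun h => ne_of_lt h)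
  exact ((List.perm_ext_iff_of_nodup n₁ n₂).mpr hm).eq_of_pairwise (le := (· < ·))
    (fun a b _ _ hab hba => absurd hba (not_lt.mpr hab.le)) h₁ h₂

-- a fold that only extends its accumulator is the accumulator ++ a flatMap
theorem pvFoldlExtend {α β : Type} (l : List α) (f : List β → α → List β) (g : α → List β)
    (h : ∀ acc x, f acc x = acc ++ g x) (acc : List β) :
    l.foldl f acc = acc ++ l.flatMap g := by
  induction l generalizing acc with
  | nil => simp
  | cons x t ih => simp [List.foldl_cons, h, ih, List.flatMap_cons, List.append_assoc]

theorem pvFlatMapCongr {α β : Type} (l : List α) (f g : α → List β)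
    (h : ∀ x ∈ l, f x = g x) : l.flatMap f = l.flatMap g := by
  induction l with
  | nil => rfl
  | cons x t ih => simp [List.flatMap_cons, h x (by simp), ih (fun y hy => h y (by simp [hy]))]

-- dropping elements whose image is empty
theorem pvFlatMapFilter {α β : Type} (l : List α) (p : α → Bool) (f : α → List β)
    (h : ∀ x ∈ l, p x = false → f x = []) : l.flatMap f = (l.filter p).flatMap f := by
  induction l with
  | nil => rfl
  | cons x t ih =>
      have ih' := ih (fun y hy hp => h y (by simp [hy]) hp)
      by_cases hx : p x = true
      · simp [List.flatMap_cons, hx, ih']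
      · simp only [Bool.not_eq_true] at hx
        simp [List.flatMap_cons, hx, h x (by simp) hx, ih']

-- the clamped-band range is the valid-shifted slice of the symmetric offset range
theorem pvFilterInterval (a b lo hi x : Int) :
    ((PySem.List.pyRange a b 1).filter (fun d => decide (lo ≤ x + d ∧ x + d ≤ hi))).map (fun d => x + d)
      = PySem.List.pyRange (max lo (x + a)) (min hi (x + b - 1) + 1) 1 := by
  apply pvSortedExt
  · exact List.Pairwise.map _ (by intro p q h; omega)
      ((PySem.List.pairwise_lt_pyRange_one a b).filter _)
  · exact PySem.List.pairwise_lt_pyRange_one _ _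
  · intro v
    simp only [List.mem_map, List.mem_filter, PySem.List.mem_pyRange_one, decide_eq_true_eq]
    constructor
    · rintro ⟨d, ⟨⟨h1, h2⟩, h3, h4⟩, rfl⟩; omega
    · intro h; exact ⟨v - x, by omega, by omega⟩

-- port A as a flatMap normal form
theorem pvA_flat (rows cols n : Int) :
    all_touching_placements rows cols n =
      (PySem.List.pyRange 0 (rows - n + 1) 1).flatMap (fun r_a =>
        (PySem.List.pyRange 0 (cols - n + 1) 1).flatMap (fun c_a =>
          (pvOffsets n).flatMap (pvSel rows cols n r_a c_a))) := by
  have hdc : ∀ (dr : Int) (acc : List (Int × Int)),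
      (PySem.List.pyRange (-n) (n + 1) 1).foldl (fun acc dc =>
        if dr = 0 ∧ dc = 0 then acc
        else if |dr| = n ∨ |dc| = n then acc ++ [(dr, dc)] else acc) acc
      = acc ++ (PySem.List.pyRange (-n) (n + 1) 1).flatMap (fun dc =>
          if dr = 0 ∧ dc = 0 then [] else if |dr| = n ∨ |dc| = n then [(dr, dc)] else []) :=
    fun dr acc => pvFoldlExtend _ _ _ (fun acc dc => by split_ifs <;> simp) acc
  have hoff : (PySem.List.pyRange (-n) (n + 1) 1).foldl (fun acc dr =>
      (PySem.List.pyRange (-n) (n + 1) 1).foldl (fun acc dc =>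
        if dr = 0 ∧ dc = 0 then acc
        else if |dr| = n ∨ |dc| = n then acc ++ [(dr, dc)] else acc) acc) []
      = pvOffsets n := by
    rw [pvFoldlExtend _ _ _ (fun acc dr => hdc dr acc), List.nil_append]; rfl
  have hin : ∀ (r_a c_a : Int) (acc : List ((Int × Int) × (Int × Int))),
      (pvOffsets n).foldl (fun acc p =>
        if 0 ≤ r_a + p.1 ∧ r_a + p.1 ≤ rows - n ∧ 0 ≤ c_a + p.2 ∧ c_a + p.2 ≤ cols - n then
          acc ++ [((r_a, c_a), (r_a + p.1, c_a + p.2))]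
        else acc) acc
      = acc ++ (pvOffsets n).flatMap (pvSel rows cols n r_a c_a) :=
    fun r_a c_a acc => pvFoldlExtend _ _ _
      (fun acc p => by unfold pvSel; split_ifs <;> simp) acc
  have hca : ∀ (r_a : Int) (acc : List ((Int × Int) × (Int × Int))),
      (PySem.List.pyRange 0 (cols - n + 1) 1).foldl (fun acc c_a =>
        (pvOffsets n).foldl (fun acc p =>
          if 0 ≤ r_a + p.1 ∧ r_a + p.1 ≤ rows - n ∧ 0 ≤ c_a + p.2 ∧ c_a + p.2 ≤ cols - n then
            acc ++ [((r_a, c_a), (r_a + p.1, c_a + p.2))]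
          else acc) acc) acc
      = acc ++ (PySem.List.pyRange 0 (cols - n + 1) 1).flatMap (fun c_a =>
          (pvOffsets n).flatMap (pvSel rows cols n r_a c_a)) :=
    fun r_a acc => pvFoldlExtend _ _ _ (fun acc c_a => hin r_a c_a acc) acc
  unfold all_touching_placements
  simp only [hoff]
  rw [pvFoldlExtend _ _ _ (fun acc r_a => hca r_a acc), List.nil_append]

-- port B as a flatMap normal form
theorem pvB_flat (rows cols n : Int) :
    all_touching_placements_alt rows cols n =
      (PySem.List.pyRange 0 (rows - n + 1) 1).flatMap (fun r_a =>
        (PySem.List.pyRange 0 (cols - n + 1) 1).flatMap (fun c_a =>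
          pvScan rows cols n r_a c_a)) := by
  have hcb : ∀ (r_a c_a r_b : Int) (acc : List ((Int × Int) × (Int × Int))),
      ((if |r_b - r_a| = n then
          PySem.List.pyRange (max 0 (c_a - n)) (min (cols - n) (c_a + n) + 1) 1
        else
          [c_a - n, c_a + n].filter (fun c => decide (0 ≤ c ∧ c ≤ cols - n)))).foldl (fun acc c_b =>
        if r_b = r_a ∧ c_b = c_a then acc
        else acc ++ [((r_a, c_a), (r_b, c_b))]) acc
      = acc ++ ((if |r_b - r_a| = n then
          PySem.List.pyRange (max 0 (c_a - n)) (min (cols - n) (c_a + n) + 1) 1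
        else
          [c_a - n, c_a + n].filter (fun c => decide (0 ≤ c ∧ c ≤ cols - n)))).flatMap (fun c_b =>
          if r_b = r_a ∧ c_b = c_a then [] else [((r_a, c_a), (r_b, c_b))]) :=
    fun r_a c_a r_b acc => pvFoldlExtend _ _ _ (fun acc c_b => by split_ifs <;> simp) acc
  have hrb : ∀ (r_a c_a : Int) (acc : List ((Int × Int) × (Int × Int))),
      (PySem.List.pyRange (max 0 (r_a - n)) (min (rows - n) (r_a + n) + 1) 1).foldl (fun acc r_b =>
        ((if |r_b - r_a| = n then
            PySem.List.pyRange (max 0 (c_a - n)) (min (cols - n) (c_a + n) + 1) 1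
          else
            [c_a - n, c_a + n].filter (fun c => decide (0 ≤ c ∧ c ≤ cols - n)))).foldl (fun acc c_b =>
          if r_b = r_a ∧ c_b = c_a then acc
          else acc ++ [((r_a, c_a), (r_b, c_b))]) acc) acc
      = acc ++ pvScan rows cols n r_a c_a :=
    fun r_a c_a acc => pvFoldlExtend _ _ _ (fun acc r_b => hcb r_a c_a r_b acc) acc
  have hca : ∀ (r_a : Int) (acc : List ((Int × Int) × (Int × Int))),
      (PySem.List.pyRange 0 (cols - n + 1) 1).foldl (fun acc c_a =>
        (PySem.List.pyRange (max 0 (r_a - n)) (min (rows - n) (r_a + n) + 1) 1).foldl (fun acc r_b =>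
          ((if |r_b - r_a| = n then
              PySem.List.pyRange (max 0 (c_a - n)) (min (cols - n) (c_a + n) + 1) 1
            else
              [c_a - n, c_a + n].filter (fun c => decide (0 ≤ c ∧ c ≤ cols - n)))).foldl (fun acc c_b =>
            if r_b = r_a ∧ c_b = c_a then acc
            else acc ++ [((r_a, c_a), (r_b, c_b))]) acc) acc) acc
      = acc ++ (PySem.List.pyRange 0 (cols - n + 1) 1).flatMap (fun c_a =>
          pvScan rows cols n r_a c_a) :=
    fun r_a acc => pvFoldlExtend _ _ _ (fun acc c_a => hrb r_a c_a acc) acc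
  unfold all_touching_placements_alt
  simp only []
  rw [pvFoldlExtend _ _ _ (fun acc r_a => hca r_a acc), List.nil_append]

-- the clamped band written with '-'/'+' instead of the lemma's normal form
theorem pvBand (lo hi x n : Int) :
    PySem.List.pyRange (max lo (x - n)) (min hi (x + n) + 1) 1
      = ((PySem.List.pyRange (-n) (n + 1) 1).filter
          (fun d => decide (lo ≤ x + d ∧ x + d ≤ hi))).map (fun d => x + d) := by
  rw [pvFilterInterval]
  have h1 : x + -n = x - n := by ring
  have h2 : x + (n + 1) - 1 = x + n := by ring
  rw [h1, h2]

theorem pvFlatMapSingletonIfP {α β : Type} (l : List α) (p : α → Prop) [DecidablePred p]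
    (f : α → β) :
    (l.flatMap fun x => if p x then [f x] else []) = (l.filter (fun x => decide (p x))).map f := by
  induction l with
  | nil => rfl
  | cons x t ih => by_cases hx : p x <;> simp [List.flatMap_cons, hx, ih]

-- the heart: per anchor, A's offset selection equals B's clamped band scan
def pvCell (rows cols n r_a c_a dr dc : Int) : List ((Int × Int) × (Int × Int)) :=
  if ¬(dr = 0 ∧ dc = 0) ∧ (|dr| = n ∨ |dc| = n) ∧
      0 ≤ r_a + dr ∧ r_a + dr ≤ rows - n ∧ 0 ≤ c_a + dc ∧ c_a + dc ≤ cols - n then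
    [((r_a, c_a), (r_a + dr, c_a + dc))]
  else []

theorem pvLhsNorm (rows cols n r_a c_a : Int) :
    (pvOffsets n).flatMap (pvSel rows cols n r_a c_a)
      = (PySem.List.pyRange (-n) (n + 1) 1).flatMap (fun dr =>
          (PySem.List.pyRange (-n) (n + 1) 1).flatMap (fun dc =>
            pvCell rows cols n r_a c_a dr dc)) := by
  unfold pvOffsets
  rw [List.flatMap_assoc]
  apply pvFlatMapCongr
  intro dr _
  rw [List.flatMap_assoc]
  apply pvFlatMapCongr
  intro dc _
  unfold pvSel pvCell
  split_ifs with h1 h2 h3 h3 h4 <;> simp_all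

theorem pvAnchorEq (rows cols n r_a c_a : Int) :
    (pvOffsets n).flatMap (pvSel rows cols n r_a c_a) = pvScan rows cols n r_a c_a := by
  rw [pvLhsNorm]
  unfold pvScan
  rcases lt_trichotomy n 0 with hn | hn | hn
  · -- n < 0: both sides are built over empty ranges
    rw [PySem.List.pyRange_one_eq_nil (a := -n) (b := n + 1) (by omega),
        PySem.List.pyRange_one_eq_nil (a := max 0 (r_a - n)) (b := min (rows - n) (r_a + n) + 1)
          (by omega)]
    rfl
  · -- n = 0: every candidate is the skipped (0,0) offset / the anchor itself
    subst hn
    have h0 : PySem.List.pyRange (-0) (0 + 1) 1 = [0] := by decide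
    rw [h0]
    simp only [List.flatMap_cons, List.flatMap_nil, List.append_nil]
    rw [show pvCell rows cols 0 r_a c_a 0 0 = [] from by unfold pvCell; simp]
    symm
    rw [List.flatMap_eq_nil_iff]
    intro r_b hrb
    rw [PySem.List.mem_pyRange_one] at hrb
    have hr : r_b = r_a := by omega
    rw [if_pos (by rw [hr]; simp)]
    rw [List.flatMap_eq_nil_iff]
    intro c_b hcb
    rw [PySem.List.mem_pyRange_one] at hcb
    have hc : c_b = c_a := by omega
    rw [if_pos ⟨hr, hc⟩]
  · -- 0 < n
    rw [pvBand 0 (rows - n) r_a n, List.flatMap_map,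
        pvFlatMapFilter (PySem.List.pyRange (-n) (n + 1) 1)
          (fun dr => decide (0 ≤ r_a + dr ∧ r_a + dr ≤ rows - n)) _ ?_]
    · apply pvFlatMapCongr
      intro dr hdr
      rw [List.mem_filter, PySem.List.mem_pyRange_one, decide_eq_true_eq] at hdr
      obtain ⟨⟨hdr1, hdr2⟩, hvr1, hvr2⟩ := hdr
      have hsub : r_a + dr - r_a = dr := by ring
      by_cases hb : |dr| = n
      · -- full-edge row: whole clamped column band
        have hdr0 : dr ≠ 0 := by intro h; rw [h] at hb; simp at hb; omega
        rw [if_pos (by rw [hsub]; exact hb), pvBand 0 (cols - n) c_a n, List.flatMap_map]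
        rw [pvFlatMapFilter (PySem.List.pyRange (-n) (n + 1) 1)
              (fun dc => decide (0 ≤ c_a + dc ∧ c_a + dc ≤ cols - n)) _ ?_]
        · apply pvFlatMapCongr
          intro dc hdc
          rw [List.mem_filter, decide_eq_true_eq] at hdc
          obtain ⟨_, hvc1, hvc2⟩ := hdc
          unfold pvCell
          rw [if_pos ⟨by simp [hdr0], Or.inl hb, hvr1, hvr2, hvc1, hvc2⟩,
              if_neg (by intro h; exact hdr0 (by omega))]
        · intro dc _ hdc
          simp only [decide_eq_false_iff_not] at hdc
          unfold pvCell
          rw [if_neg (by intro h; obtain ⟨-, -, -, -, h5, h6⟩ := h; exact hdc ⟨h5, h6⟩)]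
      · -- partial-offset row: only the two corner columns
        rw [if_neg (by rw [hsub]; exact hb)]
        have hsel : (fun dc => pvCell rows cols n r_a c_a dr dc)
            = fun dc : Int => if |dc| = n ∧ 0 ≤ c_a + dc ∧ c_a + dc ≤ cols - n then
                [((r_a, c_a), (r_a + dr, c_a + dc))] else [] := by
          funext dc
          unfold pvCell
          split_ifs with h1 h2 h2 <;> try rfl
          · obtain ⟨h1a, h1b, h1c, h1d, h1e, h1f⟩ := h1
            rcases h1b with h | h
            · exact absurd h hb
            · exact absurd ⟨h, h1e, h1f⟩ h2
          · obtain ⟨h2a, h2b, h2c⟩ := h2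
            exact absurd ⟨fun hh => by rw [hh.2] at h2a; simp at h2a; omega,
              Or.inr h2a, hvr1, hvr2, h2b, h2c⟩ h1
        rw [hsel, pvFlatMapSingletonIfP]
        have hskip : ∀ c_b ∈ [c_a - n, c_a + n].filter (fun c => decide (0 ≤ c ∧ c ≤ cols - n)),
            (if r_a + dr = r_a ∧ c_b = c_a then ([] : List ((Int × Int) × (Int × Int)))
              else [((r_a, c_a), (r_a + dr, c_b))]) = [((r_a, c_a), (r_a + dr, c_b))] := by
          intro c_b hcb
          rw [List.mem_filter] at hcb
          have hne : c_b = c_a - n ∨ c_b = c_a + n := by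
            have hm := hcb.1
            simp only [List.mem_cons, List.not_mem_nil, or_false] at hm
            exact hm
          rw [if_neg (by rintro ⟨-, rfl⟩; omega)]
        rw [pvFlatMapCongr _ _ _ hskip]
        have hmap : (fun c_b => [((r_a, c_a), (r_a + dr, c_b))])
            = fun c_b : Int => [(fun c_b => ((r_a, c_a), (r_a + dr, c_b))) c_b] := rfl
        rw [hmap, ← List.map_eq_flatMap]
        have hlists : ((PySem.List.pyRange (-n) (n + 1) 1).filter
              (fun dc => decide (|dc| = n ∧ 0 ≤ c_a + dc ∧ c_a + dc ≤ cols - n))).map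
                (fun dc => c_a + dc)
            = [c_a - n, c_a + n].filter (fun c => decide (0 ≤ c ∧ c ≤ cols - n)) := by
          apply pvSortedExt
          · exact List.Pairwise.map _ (by intro p q h; omega)
              ((PySem.List.pairwise_lt_pyRange_one (-n) (n + 1)).filter _)
          · exact List.Pairwise.filter _ (by simp; omega)
          · intro v
            simp only [List.mem_map, List.mem_filter, PySem.List.mem_pyRange_one,
              decide_eq_true_eq, List.mem_cons, List.not_mem_nil, or_false]
            constructor
            · rintro ⟨d, ⟨⟨h1, h2⟩, h3, h4, h5⟩, rfl⟩
              refine ⟨?_, h4, h5⟩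
              rcases (abs_eq (le_of_lt hn)).mp h3 with h | h
              · right; omega
              · left; omega
            · rintro ⟨h | h, h1, h2⟩ <;>
                exact ⟨v - c_a, ⟨⟨by omega, by omega⟩,
                  by rw [abs_eq (le_of_lt hn)]; omega, by omega, by omega⟩, by omega⟩
        rw [← hlists, List.map_map]
        rfl
    · intro dr _ hdr
      simp only [decide_eq_false_iff_not] at hdr
      rw [List.flatMap_eq_nil_iff]
      intro dc _
      unfold pvCell
      rw [if_neg (by intro h; obtain ⟨-, -, h3, h4, -⟩ := h; exact hdr ⟨h3, h4⟩)]

-- ===== VERDICT (by name: the statement is the Claim_ definition above) =====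
theorem all_touching_placements_spec : Claim_equal_all_touching_placements := by
  intro rows cols n _
  unfold Spec_all_touching_placements
  rw [pvA_flat, pvB_flat]
  exact pvFlatMapCongr _ _ _ (fun r_a _ => pvFlatMapCongr _ _ _ (fun c_a _ =>
    pvAnchorEq rows cols n r_a c_a))
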